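-- pv_equiv track=rewrite | github.com/mohammed-nurulhoque/bigfoont | bigfoont/braille.py | _bitmap_to_braille
-- ===== SOURCE A (Python) =====
-- BRAILLE_BASE = 0x2800
--
-- BRAILLE_DOTS = [
--     (0, 0, 0x01), (0, 1, 0x02), (0, 2, 0x04), (0, 3, 0x40),
--     (1, 0, 0x08), (1, 1, 0x10), (1, 2, 0x20), (1, 3, 0x80),
-- ]
--
-- def _bitmap_to_braille(bitmap: list[list[bool]]) -> str:
--     """Convert 2D bool bitmap to braille string."""
--     if not bitmap or not bitmap[0]:
--         return ""
--     height, width = len(bitmap), len(bitmap[0])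
--     lines = []
--     for y in range(0, height, 4):
--         line = []
--         for x in range(0, width, 2):
--             code = BRAILLE_BASE
--             for dx, dy, bit in BRAILLE_DOTS:
--                 if y + dy < height and x + dx < width and bitmap[y + dy][x + dx]:
--                     code |= bit
--             line.append(chr(code))
--         lines.append(''.join(line))
--     return '\n'.join(lines)
-- ===== SOURCE B (Python) =====
-- BRAILLE_BASE = 0x2800
--
-- def _bitmap_to_braille(bitmap):
--     """Convert 2D bool bitmap to braille string."""
--     if not bitmap or not bitmap[0]:
--         return ""
--     height, width = len(bitmap), len(bitmap[0])
--     n_rows = (height + 3) // 4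
--     n_cols = (width + 1) // 2
--     grid = [[BRAILLE_BASE] * n_cols for _ in range(n_rows)]
--     bits = [(0x01, 0x08), (0x02, 0x10), (0x04, 0x20), (0x40, 0x80)]
--     for y, row in enumerate(bitmap):
--         pair = bits[y % 4]
--         cells = grid[y // 4]
--         for x in range(width):
--             if row[x]:
--                 cells[x // 2] |= pair[x % 2]
--     return '\n'.join(''.join(map(chr, r)) for r in grid)
-- ===== Notes on version B (the rewrite author's own statement) =====
-- stated objective: alternative
-- what changed: A gathers each output cell by scanning the 8 (dx,dy,bit) dot offsets with bounds guards per cell; B inverts the traversal: it allocates a grid of blank braille cells and makes one pass over the source pixels, scattering each set pixel's dot bit into cell (y//4, x//2), then renders the grid.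
import Mathlib
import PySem

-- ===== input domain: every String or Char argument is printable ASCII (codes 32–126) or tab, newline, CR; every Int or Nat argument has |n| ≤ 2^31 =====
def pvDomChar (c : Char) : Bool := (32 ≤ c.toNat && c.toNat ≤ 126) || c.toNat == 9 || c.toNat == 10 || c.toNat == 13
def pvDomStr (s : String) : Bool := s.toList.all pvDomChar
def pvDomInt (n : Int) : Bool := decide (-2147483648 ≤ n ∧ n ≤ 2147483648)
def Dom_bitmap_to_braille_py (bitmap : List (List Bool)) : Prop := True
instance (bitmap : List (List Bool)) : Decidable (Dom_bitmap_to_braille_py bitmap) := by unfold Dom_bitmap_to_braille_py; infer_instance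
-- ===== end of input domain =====

-- A gathers each output cell by scanning the 8 (dx,dy,bit) dot offsets with bounds guards; B goes
-- the other way round: it allocates the grid of blank braille cells and scatters, in ONE pass over
-- the source pixels, each set pixel's dot bit into its cell, then renders the grid; objective:
-- alternative decomposition (pixel-driven scatter vs cell-driven gather), not speed.
-- Equality is proved on Pre_ (every row at least as long as row 0) — exactly the inputs where both
-- Pythons return instead of raising IndexError.

-- ===== PORT A =====
def pyBrailleDots : List (Nat × Nat × Nat) :=
  [(0,0,0x01),(0,1,0x02),(0,2,0x04),(0,3,0x40),(1,0,0x08),(1,1,0x10),(1,2,0x20),(1,3,0x80)]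

-- range(0, n, k) with k > 0 is exactly List.range' 0 ((n+k-1)/k) k; `(bitmap.getD … []).getD … false`
-- is bitmap[i][j], exact inside Pre_ (the guards keep i < height, j < width, and Pre_ keeps every
-- row at least width long — outside Pre_ Python raises IndexError where this reads `false`).
def bitmap_to_braille_py (bitmap : List (List Bool)) : String :=
  if bitmap = [] ∨ bitmap.headD [] = [] then "" else
    let height := bitmap.length
    let width := (bitmap.headD []).length
    let lines : List String :=
      (List.range' 0 ((height + 3) / 4) 4).map (fun y =>
        String.ofList ((List.range' 0 ((width + 1) / 2) 2).map (fun x =>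
          Char.ofNat (pyBrailleDots.foldl
            (fun code d =>
              if y + d.2.1 < height ∧ x + d.1 < width ∧
                  (bitmap.getD (y + d.2.1) []).getD (x + d.1) false = true
              then code ||| d.2.2 else code) 0x2800))))
    PySem.Str.join "\n" lines

-- ===== PORT B =====
-- bits = [(0x01,0x08),(0x02,0x10),(0x04,0x20),(0x40,0x80)]
def pyBits : List (Nat × Nat) := [(0x01,0x08),(0x02,0x10),(0x04,0x20),(0x40,0x80)]

-- the inner loop `for x in range(width): if row[x]: cells[x//2] |= pair[x%2]` (in-place update of
-- one grid row); `row.getD x false` is row[x], exact inside Pre_ (x < width ≤ len(row))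
def pyScatterRow (width : Nat) (pair : Nat × Nat) (row : List Bool) (cells : List Nat) : List Nat :=
  (List.range width).foldl (fun cs x =>
    if row.getD x false then
      cs.modify (x / 2) (fun v => v ||| (if x % 2 = 0 then pair.1 else pair.2))
    else cs) cells

-- the outer loop `for y, row in enumerate(bitmap): … grid[y//4] …` (y ≥ 0, so .toNat is exact)
def pyScatterAll (width : Nat) (rows : List (Int × List Bool)) (grid : List (List Nat)) : List (List Nat) :=
  rows.foldl (fun g p =>
    g.modify (PySem.Int.floordiv p.1 4).toNat
      (pyScatterRow width (PySem.List.pyGetD pyBits (PySem.Int.mod p.1 4) (0,0)) p.2)) grid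

def bitmap_to_braille_py_alt (bitmap : List (List Bool)) : String :=
  if bitmap = [] ∨ bitmap.headD [] = [] then "" else
    let height := bitmap.length
    let width := (bitmap.headD []).length
    let grid0 := List.replicate ((height + 3) / 4) (List.replicate ((width + 1) / 2) 0x2800)
    let grid := pyScatterAll width (PySem.List.enumerate bitmap 0) grid0
    PySem.Str.join "\n" (grid.map (fun r => String.ofList (r.map Char.ofNat)))

-- ===== PRECONDITION & SPEC =====
-- Pre_ excludes exactly the inputs where both Pythons raise IndexError: a row shorter than row 0.
def Pre_bitmap_to_braille_py (bitmap : List (List Bool)) : Prop :=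
  ∀ r ∈ bitmap, (bitmap.headD []).length ≤ r.length
instance (bitmap : List (List Bool)) : Decidable (Pre_bitmap_to_braille_py bitmap) := by
  unfold Pre_bitmap_to_braille_py; infer_instance

def pvWitness_bitmap_to_braille_py : List (List Bool) := [[true, false], [false, true]]

def Spec_bitmap_to_braille_py (bitmap : List (List Bool)) (out : String) : Prop :=
  out = bitmap_to_braille_py_alt bitmap
instance (bitmap : List (List Bool)) (out : String) : Decidable (Spec_bitmap_to_braille_py bitmap out) := by
  unfold Spec_bitmap_to_braille_py; infer_instance

-- ===== CLAIM (what is proved, stated in full; the proofs are below) =====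
def Claim_equal_bitmap_to_braille_py : Prop := ∀ (bitmap : List (List Bool)), Dom_bitmap_to_braille_py bitmap → Pre_bitmap_to_braille_py bitmap → Spec_bitmap_to_braille_py bitmap (bitmap_to_braille_py bitmap)

-- ===== LEMMAS AND PROOFS =====

-- range(0, n, k) as a map over List.range
lemma pv_range'_eq_map (k : Nat) : ∀ (n s : Nat),
    List.range' s n k = (List.range n).map (fun i => s + k * i) := by
  intro n
  induction n with
  | zero => intro s; simp
  | succ m ih =>
    intro s
    rw [List.range'_succ, List.range_succ_eq_map, List.map_cons, ih (s + k)]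
    simp [List.map_map, Function.comp, Nat.mul_add, Nat.add_assoc, Nat.add_comm, Nat.add_left_comm]

lemma pv_if_or (a b : Nat) (c : Prop) [Decidable c] :
    (if c then a ||| b else a) = a ||| (if c then b else 0) := by
  by_cases h : c <;> simp [h]

-- B's scatter applied to one band of ≤ 4 source rows (proof-only helper: the chain of
-- pyScatterRow calls the outer fold performs on one grid row)
def pvBandApply (w : Nat) (init : List Nat) : List (List Bool) → List Nat
  | [] => init
  | [a] => pyScatterRow w (0x01,0x08) a init
  | [a,b] => pyScatterRow w (0x02,0x10) b (pyScatterRow w (0x01,0x08) a init)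
  | [a,b,c] => pyScatterRow w (0x04,0x20) c (pyScatterRow w (0x02,0x10) b (pyScatterRow w (0x01,0x08) a init))
  | a::b::c::d::_ => pyScatterRow w (0x40,0x80) d (pyScatterRow w (0x04,0x20) c (pyScatterRow w (0x02,0x10) b (pyScatterRow w (0x01,0x08) a init)))

-- the grid rows B's outer fold produces, band by band (proof-only helper)
def pvBandLoop (w : Nat) (init : List Nat) : List (List Bool) → List (List Nat)
  | [] => []
  | a::b::c::d::rest => pvBandApply w init [a,b,c,d] :: pvBandLoop w init rest
  | l => [pvBandApply w init l]

lemma pv_bandLoop_eq_map (w : Nat) (init : List Nat) (bm : List (List Bool)) :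
    pvBandLoop w init bm =
      (List.range ((bm.length + 3) / 4)).map
        (fun r => pvBandApply w init ((bm.drop (4 * r)).take 4)) := by
  fun_induction pvBandLoop with
  | case1 => simp
  | case2 a b c d rest ih =>
    have h4 : (((a :: b :: c :: d :: rest).length + 3) / 4) = (rest.length + 3) / 4 + 1 := by
      simp; omega
    rw [h4, List.range_succ_eq_map, List.map_cons, List.map_map]
    refine congrArg₂ _ (by simp) ?_
    rw [ih]
    refine List.map_congr_left ?_
    intro i hi
    simp [Function.comp, Nat.mul_succ]
  | case3 l h1 h2 =>
    have hlen : 1 ≤ l.length ∧ l.length ≤ 3 := by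
      rcases l with _ | ⟨a, _ | ⟨b, _ | ⟨c, _ | ⟨d, rest⟩⟩⟩⟩
      · exact absurd rfl h1
      · simp
      · simp
      · simp
      · exact absurd rfl (h2 a b c d rest)
    have h4 : (l.length + 3) / 4 = 1 := by omega
    rw [h4]
    simp [List.take_of_length_le (by omega : l.length ≤ 4)]

lemma pv_foldl_modify_getElem? {α β : Type} (idx : β → Nat) (f : β → α → α) :
    ∀ (l : List β) (g : List α) (r : Nat),
    (l.foldl (fun g p => g.modify (idx p) (f p)) g)[r]? =
      (g[r]?).map (fun v => (l.filter (fun p => idx p == r)).foldl (fun a p => f p a) v) := by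
  intro l
  induction l with
  | nil => intro g r; simp
  | cons p l ih =>
    intro g r
    by_cases h : idx p = r
    · subst h
      simp only [List.foldl_cons, ih, List.getElem?_modify_eq, List.filter_cons, beq_self_eq_true]
      cases g[idx p]? <;> simp
    · simp only [List.foldl_cons, ih, List.getElem?_modify_ne _ _ h, List.filter_cons]
      simp [h]

lemma pv_filter_range_div2 (c : Nat) : ∀ (w : Nat),
    (List.range w).filter (fun x => x / 2 == c) =
      (if 2*c < w then [2*c] else []) ++ (if 2*c+1 < w then [2*c+1] else []) := by
  intro w
  induction w with
  | zero => simp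
  | succ n ih =>
    rw [List.range_succ, List.filter_append, ih]
    by_cases h1 : n / 2 = c
    · rcases Nat.lt_or_ge n (2*c+1) with h2 | h2
      · have e1 : n = 2*c := by omega
        have : ¬ (2*c < n) := by omega
        simp [e1, this, List.filter_cons]
      · have e1 : n = 2*c+1 := by omega
        have t1 : 2*c < n+1 := by omega
        have t2 : ¬ (2*c+1 < n) := by omega
        have t3 : 2*c < n := by omega
        have e2 : (2*c+1) / 2 = c := by omega
        simp [e1, t1, t2, t3, e2, List.filter_cons]
    · have t1 : (2*c < n+1) ↔ (2*c < n) := by omega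
      have t2 : (2*c+1 < n+1) ↔ (2*c+1 < n) := by omega
      simp [List.filter_cons, h1, t1, t2]

lemma pv_scatterRow_getElem? (w : Nat) (pr : Nat × Nat) (row : List Bool) (cells : List Nat) (c : Nat) :
    (pyScatterRow w pr row cells)[c]? = cells[c]?.map (fun v =>
      v ||| (if 2*c < w ∧ row.getD (2*c) false = true then pr.1 else 0)
        ||| (if 2*c+1 < w ∧ row.getD (2*c+1) false = true then pr.2 else 0)) := by
  have hstep : (fun (cs : List Nat) x =>
      if row.getD x false then
        cs.modify (x / 2) (fun v => v ||| (if x % 2 = 0 then pr.1 else pr.2))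
      else cs) = (fun (cs : List Nat) x =>
        cs.modify (x / 2) (fun v => if row.getD x false then v ||| (if x % 2 = 0 then pr.1 else pr.2) else v)) := by
    funext cs x
    by_cases h : row.getD x false = true
    · rw [if_pos h]
      exact congrArg _ (funext fun v => (if_pos h).symm)
    · rw [if_neg h]
      have : (fun v : Nat => if row.getD x false = true then v ||| (if x % 2 = 0 then pr.1 else pr.2) else v) = id :=
        funext fun v => if_neg h
      rw [this, List.modify_id]
  unfold pyScatterRow
  rw [hstep, pv_foldl_modify_getElem? (fun x => x / 2)
    (fun x v => if row.getD x false then v ||| (if x % 2 = 0 then pr.1 else pr.2) else v),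
    pv_filter_range_div2]
  cases cells[c]? with
  | none => simp
  | some v =>
    have e0 : (2*c) % 2 = 0 := by omega
    have e1 : ¬ ((2*c+1) % 2 = 0) := by omega
    rcases Nat.lt_or_ge (2*c+1) w with h2 | h2
    · have h1 : 2*c < w := by omega
      simp [h1, h2, e0, e1, pv_if_or]
    · have h2' : ¬ (2*c+1 < w) := by omega
      by_cases h1 : 2*c < w <;> simp [h1, h2', e0, pv_if_or]

lemma pv_bandApply_getElem? (w : Nat) (band : List (List Bool)) (hb : band.length ≤ 4)
    (init : List Nat) (c : Nat) :
    (pvBandApply w init band)[c]? = init[c]?.map (fun v =>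
      v ||| (if 0 < band.length ∧ 2*c < w ∧ (band.getD 0 []).getD (2*c) false = true then 0x01 else 0)
        ||| (if 0 < band.length ∧ 2*c+1 < w ∧ (band.getD 0 []).getD (2*c+1) false = true then 0x08 else 0)
        ||| (if 1 < band.length ∧ 2*c < w ∧ (band.getD 1 []).getD (2*c) false = true then 0x02 else 0)
        ||| (if 1 < band.length ∧ 2*c+1 < w ∧ (band.getD 1 []).getD (2*c+1) false = true then 0x10 else 0)
        ||| (if 2 < band.length ∧ 2*c < w ∧ (band.getD 2 []).getD (2*c) false = true then 0x04 else 0)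
        ||| (if 2 < band.length ∧ 2*c+1 < w ∧ (band.getD 2 []).getD (2*c+1) false = true then 0x20 else 0)
        ||| (if 3 < band.length ∧ 2*c < w ∧ (band.getD 3 []).getD (2*c) false = true then 0x40 else 0)
        ||| (if 3 < band.length ∧ 2*c+1 < w ∧ (band.getD 3 []).getD (2*c+1) false = true then 0x80 else 0)) := by
  rcases band with _ | ⟨a, _ | ⟨b, _ | ⟨c', _ | ⟨d, rest⟩⟩⟩⟩
  · cases h : init[c]? <;> simp [pvBandApply, h]
  · simp only [pvBandApply, pv_scatterRow_getElem?]
    cases h : init[c]? <;> simp [h]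
  · simp only [pvBandApply, pv_scatterRow_getElem?, Option.map_map]
    cases h : init[c]? <;> simp [h, Function.comp]
  · simp only [pvBandApply, pv_scatterRow_getElem?, Option.map_map]
    cases h : init[c]? <;> simp [h, Function.comp]
  · have hr : rest.length = 0 := by simp at hb; omega
    rw [List.length_eq_zero_iff] at hr
    subst hr
    simp only [pvBandApply, pv_scatterRow_getElem?, Option.map_map]
    cases h : init[c]? <;> simp [h, Function.comp]

lemma pv_scatter_shift (w : Nat) : ∀ (bm : List (List Bool)) (s : Int), 0 ≤ s →
    ∀ (g0 : List Nat) (gs : List (List Nat)),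
    pyScatterAll w (PySem.List.enumerate bm (s + 4)) (g0 :: gs) =
      g0 :: pyScatterAll w (PySem.List.enumerate bm s) gs := by
  intro bm
  induction bm with
  | nil => intro s hs g0 gs; simp [pyScatterAll, PySem.List.enumerate_nil]
  | cons a bm ih =>
    intro s hs g0 gs
    rw [PySem.List.enumerate_cons, PySem.List.enumerate_cons]
    simp only [pyScatterAll, List.foldl_cons]
    have hdiv : PySem.Int.floordiv (s + 4) 4 = PySem.Int.floordiv s 4 + 1 := by
      rw [PySem.Int.floordiv_eq_ediv_of_pos (by norm_num), PySem.Int.floordiv_eq_ediv_of_pos (by norm_num)]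
      have := Int.add_mul_ediv_right s 1 (by norm_num : (4:Int) ≠ 0)
      simpa using this
    have hdnn : 0 ≤ PySem.Int.floordiv s 4 := by
      rw [PySem.Int.floordiv_eq_ediv_of_pos (by norm_num)]
      exact Int.ediv_nonneg hs (by norm_num)
    have htn : (PySem.Int.floordiv (s + 4) 4).toNat = (PySem.Int.floordiv s 4).toNat + 1 := by
      rw [hdiv]; omega
    have hmod : PySem.Int.mod (s + 4) 4 = PySem.Int.mod s 4 := by
      rw [PySem.Int.mod_eq_emod_of_pos (by norm_num), PySem.Int.mod_eq_emod_of_pos (by norm_num)]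
      have := Int.add_mul_emod_self_left (a := s) (b := 4) (c := 1)
      simpa using this
    rw [htn, hmod, List.modify_succ_cons]
    have : s + 4 + 1 = (s + 1) + 4 := by ring
    rw [this]
    exact ih (s+1) (by omega) g0 _

lemma pv_scatter_chunks (w : Nat) (init : List Nat) :
    ∀ (bm : List (List Bool)) (m : Nat), (bm.length + 3) / 4 ≤ m →
    pyScatterAll w (PySem.List.enumerate bm 0) (List.replicate m init) =
      pvBandLoop w init bm ++ List.replicate (m - (bm.length + 3) / 4) init := by
  intro bm
  fun_induction pvBandLoop w init bm with
  | case1 => intro m hm; simp [pyScatterAll, PySem.List.enumerate_nil]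
  | case2 a b c d rest ih =>
    intro m hm
    have hm1 : (rest.length + 3) / 4 + 1 ≤ m := by simp at hm; omega
    obtain ⟨m', rfl⟩ : ∃ m', m = m' + 1 := ⟨m - 1, by omega⟩
    have hm' : (rest.length + 3) / 4 ≤ m' := by omega
    have d0 : (PySem.Int.floordiv (0:Int) 4).toNat = 0 := by decide
    have d1 : (PySem.Int.floordiv (0+1:Int) 4).toNat = 0 := by decide
    have d2 : (PySem.Int.floordiv (0+1+1:Int) 4).toNat = 0 := by decide
    have d3 : (PySem.Int.floordiv (0+1+1+1:Int) 4).toNat = 0 := by decide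
    have p0 : PySem.List.pyGetD pyBits (PySem.Int.mod (0:Int) 4) (0,0) = (0x01,0x08) := by decide
    have p1 : PySem.List.pyGetD pyBits (PySem.Int.mod (0+1:Int) 4) (0,0) = (0x02,0x10) := by decide
    have p2 : PySem.List.pyGetD pyBits (PySem.Int.mod (0+1+1:Int) 4) (0,0) = (0x04,0x20) := by decide
    have p3 : PySem.List.pyGetD pyBits (PySem.Int.mod (0+1+1+1:Int) 4) (0,0) = (0x40,0x80) := by decide
    rw [List.replicate_succ]
    simp only [pyScatterAll, PySem.List.enumerate_cons, List.foldl_cons, d0, d1, d2, d3,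
      p0, p1, p2, p3, List.modify_zero_cons]
    have e4 : (0:Int) + 1 + 1 + 1 + 1 = 0 + 4 := by norm_num
    rw [e4]
    have harith : ((a :: b :: c :: d :: rest).length + 3) / 4 = (rest.length + 3) / 4 + 1 := by
      simp; omega
    rw [harith]
    show pyScatterAll w (PySem.List.enumerate rest (0 + 4)) _ = _
    rw [pv_scatter_shift w rest 0 le_rfl, ih m' hm']
    have e5 : m' + 1 - ((rest.length + 3) / 4 + 1) = m' - (rest.length + 3) / 4 := by omega
    rw [e5]
    rfl
  | case3 l h1 h2 =>
    intro m hm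
    have d0 : (PySem.Int.floordiv (0:Int) 4).toNat = 0 := by decide
    have d1 : (PySem.Int.floordiv (0+1:Int) 4).toNat = 0 := by decide
    have d2 : (PySem.Int.floordiv (0+1+1:Int) 4).toNat = 0 := by decide
    have p0 : PySem.List.pyGetD pyBits (PySem.Int.mod (0:Int) 4) (0,0) = (0x01,0x08) := by decide
    have p1 : PySem.List.pyGetD pyBits (PySem.Int.mod (0+1:Int) 4) (0,0) = (0x02,0x10) := by decide
    have p2 : PySem.List.pyGetD pyBits (PySem.Int.mod (0+1+1:Int) 4) (0,0) = (0x04,0x20) := by decide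
    rcases l with _ | ⟨a, _ | ⟨b, _ | ⟨c, _ | ⟨d, rest⟩⟩⟩⟩
    · exact absurd rfl h1
    · have hm1 : 1 ≤ m := by simp at hm; omega
      obtain ⟨m', rfl⟩ : ∃ m', m = m' + 1 := ⟨m - 1, by omega⟩
      rw [List.replicate_succ]
      simp only [pyScatterAll, PySem.List.enumerate_cons, PySem.List.enumerate_nil,
        List.foldl_cons, List.foldl_nil, d0, p0, List.modify_zero_cons]
      simp [pvBandApply]
    · have hm1 : 1 ≤ m := by simp at hm; omega
      obtain ⟨m', rfl⟩ : ∃ m', m = m' + 1 := ⟨m - 1, by omega⟩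
      rw [List.replicate_succ]
      simp only [pyScatterAll, PySem.List.enumerate_cons, PySem.List.enumerate_nil,
        List.foldl_cons, List.foldl_nil, d0, d1, p0, p1, List.modify_zero_cons]
      simp [pvBandApply]
    · have hm1 : 1 ≤ m := by simp at hm; omega
      obtain ⟨m', rfl⟩ : ∃ m', m = m' + 1 := ⟨m - 1, by omega⟩
      rw [List.replicate_succ]
      simp only [pyScatterAll, PySem.List.enumerate_cons, PySem.List.enumerate_nil,
        List.foldl_cons, List.foldl_nil, d0, d1, d2, p0, p1, p2, List.modify_zero_cons]
      simp [pvBandApply]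
    · exact absurd rfl (h2 a b c d rest)

-- one guard of B's band rewritten to the matching guard of A's dot scan
lemma pv_band_term (bm : List (List Bool)) (r j x bit w : Nat) (hj : j < 4) :
    (if j < ((bm.drop (4*r)).take 4).length ∧ x < w ∧
        (((bm.drop (4*r)).take 4).getD j []).getD x false = true then bit else 0) =
      (if 4*r + j < bm.length ∧ x < w ∧ (bm.getD (4*r+j) []).getD x false = true then bit else 0) := by
  have hlen : ((bm.drop (4*r)).take 4).length = min 4 (bm.length - 4*r) := by simp
  by_cases hb : 4*r + j < bm.length
  · have hjl : j < ((bm.drop (4*r)).take 4).length := by omega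
    have hget : ((bm.drop (4*r)).take 4).getD j [] = bm.getD (4*r+j) [] := by
      rw [List.getD_eq_getElem?_getD, List.getD_eq_getElem?_getD, List.getElem?_take,
        List.getElem?_drop]
      simp [hj]
    have h2 : j < bm.length - 4*r := by omega
    rw [hget]
    simp [hj, h2, hb]
  · have h2 : ¬ (j < bm.length - 4*r) := by omega
    simp [hb]
    intro _ h4
    exact fun _ _ => absurd h4 (by omega)

-- A ORs the even-column dots of the four rows first, B interleaves per row: same join
lemma pv_or_perm (v a1 a2 a3 a4 b1 b2 b3 b4 : Nat) :
    v ||| a1 ||| a2 ||| a3 ||| a4 ||| b1 ||| b2 ||| b3 ||| b4 =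
      v ||| a1 ||| b1 ||| a2 ||| b2 ||| a3 ||| b3 ||| a4 ||| b4 := by
  simp [Nat.or_comm, Nat.or_left_comm]

-- ===== VERDICT (by name: the statement is the Claim_ definition above) =====
theorem bitmap_to_braille_py_spec : Claim_equal_bitmap_to_braille_py := by
  intro bm _ hpre
  unfold Spec_bitmap_to_braille_py bitmap_to_braille_py bitmap_to_braille_py_alt
  by_cases hg : bm = [] ∨ bm.headD [] = []
  · rw [if_pos hg, if_pos hg]
  · rw [if_neg hg, if_neg hg]
    dsimp only
    have hbm : bm ≠ [] := fun h => hg (Or.inl h)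
    have hlen1 : 1 ≤ bm.length := List.length_pos_iff.mpr hbm
    refine congrArg _ ?_
    rw [pv_scatter_chunks ((bm.headD []).length)
      (List.replicate (((bm.headD []).length + 1) / 2) 0x2800) bm ((bm.length + 3) / 4) le_rfl,
      Nat.sub_self, List.replicate_zero, List.append_nil,
      pv_bandLoop_eq_map, List.map_map,
      pv_range'_eq_map 4 ((bm.length + 3) / 4) 0, List.map_map]
    refine List.map_congr_left ?_
    intro r hr
    have hrlt : r < (bm.length + 3) / 4 := by
      simpa using List.mem_range.mp hr
    dsimp only [Function.comp]
    refine congrArg _ ?_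
    rw [pv_range'_eq_map 2 (((bm.headD []).length + 1) / 2) 0, List.map_map]
    refine List.ext_getElem? ?_
    intro c
    rw [List.getElem?_map, List.getElem?_map,
      pv_bandApply_getElem? _ _ (by simp) _ c, List.getElem?_replicate]
    by_cases hc : c < ((bm.headD []).length + 1) / 2
    · rw [if_pos hc, List.getElem?_range hc]
      simp only [Option.map_some]
      dsimp only [Function.comp]
      refine congrArg _ (congrArg _ ?_)
      simp only [pyBrailleDots, List.foldl_cons, List.foldl_nil, pv_if_or]
      rw [pv_band_term bm r 0 (2*c) 0x01 _ (by omega),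
        pv_band_term bm r 0 (2*c+1) 0x08 _ (by omega),
        pv_band_term bm r 1 (2*c) 0x02 _ (by omega),
        pv_band_term bm r 1 (2*c+1) 0x10 _ (by omega),
        pv_band_term bm r 2 (2*c) 0x04 _ (by omega),
        pv_band_term bm r 2 (2*c+1) 0x20 _ (by omega),
        pv_band_term bm r 3 (2*c) 0x40 _ (by omega),
        pv_band_term bm r 3 (2*c+1) 0x80 _ (by omega)]
      simp only [Nat.zero_add, Nat.add_zero]
      exact pv_or_perm _ _ _ _ _ _ _ _ _
    · rw [if_neg hc]
      have : ¬ c < (List.range (((bm.headD []).length + 1) / 2)).length := by simpa using hc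
      rw [List.getElem?_eq_none_iff.mpr (by simpa using hc)]
      simp
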